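-- pv_equiv track=rewrite | github.com/UiPath/fusion25-prodev-lab | src/company-agent/workflows.py | normalize_path_with_kleene
-- ===== SOURCE A (Python) =====
-- def normalize_path_with_kleene(path: list[str]) -> str:
--     """Convert a path with self-loops to Kleene star notation.
--
--     Args:
--         path: List of node names
--
--     Returns:
--         String representation using Kleene star for repeated nodes
--
--     Example:
--         ["START", "supervisor", "supervisor", "policy", "END"]
--         -> "START -> supervisor* -> policy -> END"
--     """
--     if not path:
--         return ""
--
--     normalized = []
--     i = 0
--
--     while i < len(path):
--         current = path[i]
--
--         # Check if next node is the same (self-loop)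
--         if i + 1 < len(path) and path[i + 1] == current:
--             normalized.append(f"{current}*")
--             # Skip all consecutive occurrences
--             while i < len(path) and path[i] == current:
--                 i += 1
--         else:
--             normalized.append(current)
--             i += 1
--
--     return " -> ".join(normalized)
-- ===== SOURCE B (Python) =====
-- def normalize_path_with_kleene(path: list[str]) -> str:
--     # Stateless "stencil" formulation: align each node with its predecessor and
--     # successor via shifted copies of the list; a node is emitted iff it differs
--     # from its predecessor (run start), starred iff it equals its successor.
--     prevs = [None] + path[:-1]
--     nexts = path[1:] + [None]
--     labels = [cur + "*" if cur == nxt else cur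
--               for prev, cur, nxt in zip(prevs, path, nexts)
--               if cur != prev]
--     return " -> ".join(labels)
-- ===== Notes on version B (the rewrite author's own statement) =====
-- stated objective: alternative
-- what changed: Replaced A's stateful index walk with a nested skip-loop by a stateless stencil: zip the list with shifted copies of itself (predecessor/successor), keep a node iff it differs from its predecessor, star it iff it equals its successor, then join.
import Mathlib
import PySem

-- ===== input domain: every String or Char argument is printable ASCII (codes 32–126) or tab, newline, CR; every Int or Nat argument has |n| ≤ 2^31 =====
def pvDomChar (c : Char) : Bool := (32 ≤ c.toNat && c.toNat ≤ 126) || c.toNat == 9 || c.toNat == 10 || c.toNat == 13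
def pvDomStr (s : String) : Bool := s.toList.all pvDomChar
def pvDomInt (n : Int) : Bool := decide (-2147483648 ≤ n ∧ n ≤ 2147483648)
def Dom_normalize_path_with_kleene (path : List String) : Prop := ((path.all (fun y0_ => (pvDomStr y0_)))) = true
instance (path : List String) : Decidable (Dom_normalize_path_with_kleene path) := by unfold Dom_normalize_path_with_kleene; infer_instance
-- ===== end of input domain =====

-- ===== PORT A =====
-- B replaces A's stateful index walk (with a nested skip loop) by a stateless stencil over
-- shifted copies of the list (predecessor/successor comparisons); equal return value proved.

-- inner `while i < len(path) and path[i] == current: i += 1`, as a drop on the suffix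
def pvDropEq (c : String) : List String → List String
  | [] => []
  | x :: xs => if x = c then pvDropEq c xs else x :: xs

theorem pvDropEq_length_le (c : String) (l : List String) : (pvDropEq c l).length ≤ l.length := by
  induction l with
  | nil => simp [pvDropEq]
  | cons x xs ih =>
    simp only [pvDropEq]
    split
    · exact Nat.le_succ_of_le ih
    · simp

-- outer while loop of A, recursing on the remaining suffix of path
def pvGoA (acc : List String) : List String → List String
  | [] => acc
  | c :: rest =>
    if rest.head? = some c then
      pvGoA (acc ++ [c ++ "*"]) (pvDropEq c rest)
    else
      pvGoA (acc ++ [c]) rest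
termination_by l => l.length
decreasing_by
  · exact Nat.lt_succ_of_le (pvDropEq_length_le c rest)
  · simp

def normalize_path_with_kleene (path : List String) : String :=
  if path = [] then ""
  else PySem.Str.join " -> " (pvGoA [] path)

-- ===== PORT B =====
-- prevs = [None] + path[:-1]; nexts = path[1:] + [None]; zip-filter-map, then join
def normalize_path_with_kleene_alt (path : List String) : String :=
  PySem.Str.join " -> "
    (((((none :: (path.dropLast.map some)) : List (Option String)).zip path).zip
        (((path.drop 1).map some) ++ ([none] : List (Option String)))).filterMap (fun pcn =>
      if some pcn.1.2 ≠ pcn.1.1 then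
        some (if some pcn.1.2 = pcn.2 then pcn.1.2 ++ "*" else pcn.1.2)
      else none))

-- ===== PRECONDITION & SPEC =====
def Spec_normalize_path_with_kleene (path : List String) (out : String) : Prop := out = normalize_path_with_kleene_alt path
instance (path : List String) (out : String) : Decidable (Spec_normalize_path_with_kleene path out) := by unfold Spec_normalize_path_with_kleene; infer_instance

-- ===== CLAIM (what is proved, stated in full; the proofs are below) =====
def Claim_equal_normalize_path_with_kleene : Prop := ∀ (path : List String), Dom_normalize_path_with_kleene path → Spec_normalize_path_with_kleene path (normalize_path_with_kleene path)

-- ===== LEMMAS AND PROOFS =====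

-- maximal runs of equal consecutive elements, as (key, run-length) pairs: the common
-- characterisation both ports are reduced to
def pvRuns : List String → List (String × Nat)
  | [] => []
  | x :: xs =>
    (x, 1 + (xs.takeWhile (fun y => y == x)).length) :: pvRuns (xs.dropWhile (fun y => y == x))
termination_by l => l.length
decreasing_by
  exact Nat.lt_succ_of_le (List.length_dropWhile_le _ _)

def pvParts (l : List String) : List String :=
  (pvRuns l).map (fun kn => if 1 < kn.2 then kn.1 ++ "*" else kn.1)

theorem pvGoA_eq_parts : ∀ (n : Nat) (l : List String), l.length ≤ n →
    ∀ acc, pvGoA acc l = acc ++ pvParts l := by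
  intro n
  induction n with
  | zero =>
    intro l hl acc
    have : l = [] := List.eq_nil_of_length_eq_zero (Nat.le_zero.mp hl)
    subst this
    simp [pvGoA, pvParts, pvRuns]
  | succ n ih =>
    intro l hl acc
    match l with
    | [] => simp [pvGoA, pvParts, pvRuns]
    | c :: rest =>
      have hlen : rest.length ≤ n := Nat.succ_le_succ_iff.mp hl
      by_cases h : rest.head? = some c
      · obtain ⟨rest', hrest⟩ : ∃ rest', rest = c :: rest' := by
          cases rest with
          | nil => simp at h
          | cons y ys => simp at h; exact ⟨ys, by simp [h]⟩
        subst hrest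
        have hdropEq : ∀ m, ∀ (xs : List String), xs.length ≤ m →
            pvDropEq c xs = xs.dropWhile (fun y => y == c) := by
          intro m
          induction m with
          | zero =>
            intro xs hxs
            have : xs = [] := List.eq_nil_of_length_eq_zero (Nat.le_zero.mp hxs)
            simp [this, pvDropEq]
          | succ m ihm =>
            intro xs hxs
            cases xs with
            | nil => simp [pvDropEq]
            | cons y ys =>
              simp only [pvDropEq, List.dropWhile_cons]
              by_cases hy : y = c
              · simp [hy, ihm ys (Nat.succ_le_succ_iff.mp hxs)]
              · simp [hy]
        rw [pvGoA, if_pos h]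
        rw [hdropEq (c :: rest').length _ (le_refl _)]
        have hdw : (c :: rest').dropWhile (fun y => y == c) = rest'.dropWhile (fun y => y == c) := by
          simp [List.dropWhile_cons]
        rw [hdw]
        have hd : (rest'.dropWhile (fun y => y == c)).length ≤ n :=
          le_trans (List.length_dropWhile_le _ _) (le_trans (Nat.le_succ _) hlen)
        rw [ih _ hd]
        have hparts : pvParts (c :: c :: rest') =
            (c ++ "*") :: pvParts (rest'.dropWhile (fun y => y == c)) := by
          simp only [pvParts, pvRuns, List.map_cons, List.takeWhile_cons, List.dropWhile_cons]
          simp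
        rw [hparts]
        simp
      · have htw : rest.takeWhile (fun y => y == c) = [] := by
          cases rest with
          | nil => simp
          | cons y ys =>
            have : ¬ (y = c) := fun hy => h (by simp [hy])
            simp [List.takeWhile_cons, this]
        have hdw : rest.dropWhile (fun y => y == c) = rest := by
          cases rest with
          | nil => simp
          | cons y ys =>
            have : ¬ (y = c) := fun hy => h (by simp [hy])
            simp [List.dropWhile_cons, this]
        rw [pvGoA, if_neg h, ih rest hlen]
        have hparts : pvParts (c :: rest) = c :: pvParts rest := by
          simp only [pvParts, pvRuns, List.map_cons, htw, hdw]
          simp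
        rw [hparts]
        simp

-- recursive rendering of B's zip/filterMap computation, carrying the predecessor
def pvLabels (prev : Option String) : List String → List String
  | [] => []
  | c :: rest =>
    (if some c ≠ prev then
       [if rest.head? = some c then c ++ "*" else c]
     else []) ++ pvLabels (some c) rest

theorem pvZip_eq_labels : ∀ (l : List String) (prev : Option String),
    (((prev :: l.dropLast.map some).zip l).zip ((l.drop 1).map some ++ [none])).filterMap
      (fun pcn : (Option String × String) × Option String =>
        if some pcn.1.2 ≠ pcn.1.1 then
          some (if some pcn.1.2 = pcn.2 then pcn.1.2 ++ "*" else pcn.1.2)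
        else none)
    = pvLabels prev l := by
  intro l
  induction l with
  | nil => intro prev; simp [pvLabels]
  | cons c rest ih =>
    intro prev
    cases rest with
    | nil =>
      simp [pvLabels]
      by_cases h : some c = prev <;> simp [h]
    | cons r rs =>
      have hstep := ih (some c)
      simp only [List.dropLast_cons_of_ne_nil (by simp : (r :: rs : List String) ≠ []),
        List.map_cons, List.drop_one, List.tail_cons, List.cons_append,
        List.zip_cons_cons] at hstep ⊢
      rw [List.filterMap_cons, pvLabels, List.head?_cons, ← hstep]
      by_cases h : some c = prev
      · subst h
        simp
      · by_cases h2 : c = r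
        · subst h2
          simp [h]
        · simp [h, h2, Ne.symm h2]

theorem pvLabels_drop (c : String) : ∀ (l : List String),
    pvLabels (some c) l = pvLabels (some c) (l.dropWhile (fun y => y == c)) := by
  intro l
  induction l with
  | nil => simp
  | cons x xs ih =>
    by_cases hx : x = c
    · subst hx
      simp only [pvLabels, ne_eq, List.dropWhile_cons, beq_self_eq_true, if_true]
      simpa using ih
    · simp [List.dropWhile_cons, hx]

theorem pvLabels_eq_parts : ∀ (n : Nat) (l : List String), l.length ≤ n →
    ∀ prev, l.head? ≠ prev → pvLabels prev l = pvParts l := by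
  intro n
  induction n with
  | zero =>
    intro l hl prev _
    have : l = [] := List.eq_nil_of_length_eq_zero (Nat.le_zero.mp hl)
    subst this; simp [pvLabels, pvParts, pvRuns]
  | succ n ih =>
    intro l hl prev hprev
    match l with
    | [] => simp [pvLabels, pvParts, pvRuns]
    | c :: rest =>
      have hlen : rest.length ≤ n := Nat.succ_le_succ_iff.mp hl
      have hc : some c ≠ prev := by simpa using hprev
      by_cases h : rest.head? = some c
      · -- run of length ≥ 2
        have hdw : (rest.dropWhile (fun y => y == c)).head? ≠ some c := by
          have := List.head?_dropWhile_not (p := fun y => y == c) (l := rest)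
          intro hcontra
          rw [hcontra] at this
          simp at this
        have hd : (rest.dropWhile (fun y => y == c)).length ≤ n :=
          le_trans (List.length_dropWhile_le _ _) hlen
        have htw : rest.takeWhile (fun y => y == c) ≠ [] := by
          cases rest with
          | nil => simp at h
          | cons y ys =>
            simp at h
            simp [List.takeWhile_cons, h]
        have hparts : pvParts (c :: rest) =
            (c ++ "*") :: pvParts (rest.dropWhile (fun y => y == c)) := by
          simp only [pvParts, pvRuns, List.map_cons]
          congr 1
          have : 0 < (rest.takeWhile (fun y => y == c)).length :=
            List.length_pos_iff.mpr htw
          rw [if_pos (by omega)]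
        rw [hparts, pvLabels, if_pos hc, h]
        rw [pvLabels_drop, ih _ hd _ hdw]
        simp
      · -- singleton run
        have htw : rest.takeWhile (fun y => y == c) = [] := by
          cases rest with
          | nil => simp
          | cons y ys =>
            have : ¬ (y = c) := fun hy => h (by simp [hy])
            simp [List.takeWhile_cons, this]
        have hdw : rest.dropWhile (fun y => y == c) = rest := by
          cases rest with
          | nil => simp
          | cons y ys =>
            have : ¬ (y = c) := fun hy => h (by simp [hy])
            simp [List.dropWhile_cons, this]
        have hparts : pvParts (c :: rest) = c :: pvParts rest := by
          simp only [pvParts, pvRuns, List.map_cons, htw, hdw]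
          simp
        rw [hparts, pvLabels, if_pos hc, if_neg h, ih rest hlen _ h]
        simp

-- ===== VERDICT (by name: the statement is the Claim_ definition above) =====
theorem normalize_path_with_kleene_spec : Claim_equal_normalize_path_with_kleene := by
  intro path _
  unfold Spec_normalize_path_with_kleene normalize_path_with_kleene normalize_path_with_kleene_alt
  rw [pvZip_eq_labels path none]
  by_cases hp : path = []
  · simp [hp, pvLabels, PySem.Str.join]
  · rw [if_neg hp, pvGoA_eq_parts path.length path (le_refl _) [],
      pvLabels_eq_parts path.length path (le_refl _) none (by cases path <;> simp_all)]
    simp
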